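-- pv_equiv track=rewrite | github.com/2702kvc-ship-it/Code-PTIT-Python | Python/PY01039.py | HEHEHE
-- ===== SOURCE A (Python) =====
-- AnhKhongThuongEm = False
--
-- EmChiYeuMinhAnh = True
--
-- def HEHEHE(s):
--     if s[0] == s[1]:
--         return AnhKhongThuongEm
--     for i in range(0, len(s) - 2, 2):
--         if s[i] != s[i + 2]:
--             return AnhKhongThuongEm
--     for i in range(1, len(s) - 2, 2):
--         if s[i] != s[i + 2]:
--             return AnhKhongThuongEm
--     return EmChiYeuMinhAnh
-- ===== SOURCE B (Python) =====
-- def HEHEHE(s):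
--     if s[0] == s[1]:
--         return False
--     expected = (s[0] + s[1]) * (len(s) // 2 + 1)
--     return s == expected[:len(s)]
-- ===== Notes on version B (the rewrite author's own statement) =====
-- stated objective: simpler
-- what changed: Replaces A's two strided index loops (comparing s[i] with s[i+2] separately over even and odd positions) by building the expected alternating string (s[0]+s[1])*(len(s)//2+1) once and comparing s to its prefix.
import Mathlib
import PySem

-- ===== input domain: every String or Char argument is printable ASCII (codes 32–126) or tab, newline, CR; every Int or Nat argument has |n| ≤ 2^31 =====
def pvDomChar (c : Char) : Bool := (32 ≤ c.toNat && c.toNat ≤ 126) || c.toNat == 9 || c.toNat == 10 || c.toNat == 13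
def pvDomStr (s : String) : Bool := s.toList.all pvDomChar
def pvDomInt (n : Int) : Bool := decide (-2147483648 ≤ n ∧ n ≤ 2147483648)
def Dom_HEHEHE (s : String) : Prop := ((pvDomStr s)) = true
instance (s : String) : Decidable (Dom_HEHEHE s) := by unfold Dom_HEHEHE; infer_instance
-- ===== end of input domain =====

-- B replaces A's two strided s[i]==s[i+2] loops by building the expected alternating
-- string (s[0]+s[1])*(len(s)//2+1) once and comparing s to its prefix (objective: simpler).

-- ===== PORT A =====
-- one 'for i in range(…): if s[i] != s[i+2]: return False' loop (early exit)
def pvLoopA (l : List Char) : List Int → Bool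
  | [] => true
  | i :: rest =>
      if PySem.List.pyGetD l i ' ' ≠ PySem.List.pyGetD l (i + 2) ' ' then false
      else pvLoopA l rest

def HEHEHE (s : String) : Bool :=
  let l := s.toList
  if PySem.List.pyGetD l 0 ' ' = PySem.List.pyGetD l 1 ' ' then false
  else if pvLoopA l (PySem.List.pyRange 0 ((l.length : Int) - 2) 2) = false then false
  else if pvLoopA l (PySem.List.pyRange 1 ((l.length : Int) - 2) 2) = false then false
  else true

-- ===== PORT B =====
def HEHEHE_alt (s : String) : Bool :=
  let l := s.toList
  let a := PySem.List.pyGetD l 0 ' '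
  let b := PySem.List.pyGetD l 1 ' '
  if a = b then false
  else
    let expected := (List.replicate (l.length / 2 + 1) [a, b]).flatten
    l == expected.take l.length

-- ===== PRECONDITION & SPEC =====
-- Pre_ excludes strings of length < 2, on which the Python A (and B) raise IndexError at s[0]/s[1].
def Pre_HEHEHE (s : String) : Prop := 2 ≤ s.toList.length
instance (s : String) : Decidable (Pre_HEHEHE s) := by unfold Pre_HEHEHE; infer_instance
def pvWitness_HEHEHE : String := "abab"

def Spec_HEHEHE (s : String) (out : Bool) : Prop := out = HEHEHE_alt s
instance (s : String) (out : Bool) : Decidable (Spec_HEHEHE s out) := by unfold Spec_HEHEHE; infer_instance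

-- ===== CLAIM (what is proved, stated in full; the proofs are below) =====
def Claim_equal_HEHEHE : Prop := ∀ (s : String), Dom_HEHEHE s → Pre_HEHEHE s → Spec_HEHEHE s (HEHEHE s)

-- ===== LEMMAS AND PROOFS =====

-- pvLoopA is true iff every listed index passes the comparison
theorem pvLoopA_eq_true_iff (l : List Char) (idx : List Int) :
    pvLoopA l idx = true ↔
      ∀ i ∈ idx, PySem.List.pyGetD l i ' ' = PySem.List.pyGetD l (i + 2) ' ' := by
  induction idx with
  | nil => simp [pvLoopA]
  | cons i rest ih =>
      by_cases h : PySem.List.pyGetD l i ' ' = PySem.List.pyGetD l (i + 2) ' '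
      · simp [pvLoopA, h, ih]
      · simp [pvLoopA, h]

-- the element of the flattened replicated 2-block
theorem flatten_replicate_getD (a b : Char) (k i : Nat) (hi : i < 2 * k) :
    ((List.replicate k [a, b]).flatten).getD i ' ' = (if i % 2 = 0 then a else b) := by
  induction k generalizing i with
  | zero => omega
  | succ k ih =>
      match i with
      | 0 => simp [List.replicate_succ]
      | 1 => simp [List.replicate_succ]
      | (j + 2) =>
          have hj : j < 2 * k := by omega
          have := ih j hj
          simpa [List.replicate_succ, Nat.add_mod_right] using this

theorem length_flatten_replicate (a b : Char) (k : Nat) :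
    ((List.replicate k [a, b]).flatten).length = 2 * k := by
  induction k with
  | zero => simp
  | succ k ih => simp [List.replicate_succ, ih]; omega

-- the combined shift property ↔ the parity-pattern property
theorem shift_iff_pattern (l : List Char) :
    (∀ i : Nat, i + 2 < l.length → l.getD i ' ' = l.getD (i + 2) ' ') ↔
      (∀ i : Nat, i < l.length → l.getD i ' ' = (if i % 2 = 0 then l.getD 0 ' ' else l.getD 1 ' ')) := by
  constructor
  · intro hshift i
    induction i using Nat.strong_induction_on with
    | _ i ih =>
        intro hi
        match i with
        | 0 => simp
        | 1 => simp
        | (j + 2) =>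
            have h1 : l.getD j ' ' = l.getD (j + 2) ' ' := hshift j hi
            have h2' : l.getD j ' ' = (if j % 2 = 0 then l.getD 0 ' ' else l.getD 1 ' ') :=
              ih j (by omega) (by omega)
            rw [← h1, h2', Nat.add_mod_right]
  · intro hpat i hi
    have ha := hpat i (by omega)
    have hb := hpat (i + 2) hi
    rw [ha, hb, Nat.add_mod_right]

theorem pyGetD_nat (l : List Char) (j : Nat) :
    PySem.List.pyGetD l (j : Int) ' ' = l.getD j ' ' := by
  rw [PySem.List.pyGetD_of_nonneg l ' ' (by positivity)]
  simp

-- membership in the even / odd step-2 ranges, in Nat form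
theorem mem_even_range (l : List Char) (i : Int)
    (hi : i ∈ PySem.List.pyRange 0 ((l.length : Int) - 2) 2) :
    ∃ j : Nat, i = (j : Int) ∧ j + 2 < l.length ∧ j % 2 = 0 := by
  rcases (PySem.List.mem_pyRange_iff_of_pos (by norm_num) i).1 hi with ⟨h0, h1, h2⟩
  refine ⟨i.toNat, by omega, by omega, ?_⟩
  rcases h2 with ⟨c, hc⟩
  omega

theorem mem_odd_range (l : List Char) (i : Int)
    (hi : i ∈ PySem.List.pyRange 1 ((l.length : Int) - 2) 2) :
    ∃ j : Nat, i = (j : Int) ∧ j + 2 < l.length ∧ j % 2 = 1 := by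
  rcases (PySem.List.mem_pyRange_iff_of_pos (by norm_num) i).1 hi with ⟨h0, h1, h2⟩
  refine ⟨i.toNat, by omega, by omega, ?_⟩
  rcases h2 with ⟨c, hc⟩
  omega

-- both loops succeed ↔ the shift property holds on all of [0, n-2)
theorem loops_iff_shift (l : List Char) :
    (pvLoopA l (PySem.List.pyRange 0 ((l.length : Int) - 2) 2) = true ∧
     pvLoopA l (PySem.List.pyRange 1 ((l.length : Int) - 2) 2) = true) ↔
      (∀ i : Nat, i + 2 < l.length → l.getD i ' ' = l.getD (i + 2) ' ') := by
  rw [pvLoopA_eq_true_iff, pvLoopA_eq_true_iff]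
  constructor
  · rintro ⟨heven, hodd⟩ i hi
    have hi' : (i : Int) + 2 < (l.length : Int) := by exact_mod_cast hi
    rcases Nat.even_or_odd i with he | ho
    · have hm : (i : Int) ∈ PySem.List.pyRange 0 ((l.length : Int) - 2) 2 := by
        rw [PySem.List.mem_pyRange_iff_of_pos (by norm_num)]
        refine ⟨by positivity, by omega, ?_⟩
        rcases he with ⟨c, hc⟩
        exact ⟨(c : Int), by omega⟩
      have := heven _ hm
      rwa [pyGetD_nat, show ((i : Int) + 2) = ((i + 2 : Nat) : Int) by push_cast; ring,
        pyGetD_nat] at this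
    · have hm : (i : Int) ∈ PySem.List.pyRange 1 ((l.length : Int) - 2) 2 := by
        rw [PySem.List.mem_pyRange_iff_of_pos (by norm_num)]
        rcases ho with ⟨c, hc⟩
        refine ⟨by omega, by omega, ⟨(c : Int), by omega⟩⟩
      have := hodd _ hm
      rwa [pyGetD_nat, show ((i : Int) + 2) = ((i + 2 : Nat) : Int) by push_cast; ring,
        pyGetD_nat] at this
  · intro hshift
    constructor
    · intro i hi
      rcases mem_even_range l i hi with ⟨j, rfl, hj, _⟩
      rw [pyGetD_nat, show ((j : Int) + 2) = ((j + 2 : Nat) : Int) by push_cast; ring, pyGetD_nat]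
      exact hshift j hj
    · intro i hi
      rcases mem_odd_range l i hi with ⟨j, rfl, hj, _⟩
      rw [pyGetD_nat, show ((j : Int) + 2) = ((j + 2 : Nat) : Int) by push_cast; ring, pyGetD_nat]
      exact hshift j hj

-- B's comparison ↔ the parity-pattern property
theorem beq_iff_pattern (l : List Char) :
    (l == ((List.replicate (l.length / 2 + 1)
        [l.getD 0 ' ', l.getD 1 ' ']).flatten).take l.length) = true ↔
      (∀ i : Nat, i < l.length → l.getD i ' ' = (if i % 2 = 0 then l.getD 0 ' ' else l.getD 1 ' ')) := by
  set a := l.getD 0 ' ' with ha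
  set b := l.getD 1 ' ' with hb
  set k := l.length / 2 + 1 with hk
  have hlen : ((List.replicate k [a, b]).flatten).length = 2 * k :=
    length_flatten_replicate a b k
  have htake : ∀ i : Nat, i < l.length →
      (((List.replicate k [a, b]).flatten).take l.length).getD i ' ' =
        (if i % 2 = 0 then a else b) := by
    intro i hi
    rw [List.getD_eq_getElem?_getD, List.getElem?_take_of_lt hi,
        ← List.getD_eq_getElem?_getD, flatten_replicate_getD a b k i (by omega)]
  rw [beq_iff_eq]
  constructor
  · intro heq i hi
    have : l.getD i ' ' = (((List.replicate k [a, b]).flatten).take l.length).getD i ' ' := by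
      rw [← heq]
    rw [this, htake i hi]
  · intro hpat
    apply List.ext_getElem
    · simp [hlen]; omega
    · intro i hil hir
      have h1 : l[i] = l.getD i ' ' := (List.getD_eq_getElem l ' ' hil).symm
      have h2' : (((List.replicate k [a, b]).flatten).take l.length)[i] =
          (((List.replicate k [a, b]).flatten).take l.length).getD i ' ' :=
        (List.getD_eq_getElem _ ' ' hir).symm
      rw [h1, h2', htake i hil]
      exact hpat i hil

-- ===== VERDICT (by name: the statement is the Claim_ definition above) =====
theorem HEHEHE_spec : Claim_equal_HEHEHE := by
  intro s _ hpre
  unfold Spec_HEHEHE HEHEHE HEHEHE_alt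
  set l := s.toList with hl
  have h0 : PySem.List.pyGetD l 0 ' ' = l.getD 0 ' ' := by
    simpa using pyGetD_nat l 0
  have h1 : PySem.List.pyGetD l 1 ' ' = l.getD 1 ' ' := by
    simpa using pyGetD_nat l 1
  by_cases hab : PySem.List.pyGetD l 0 ' ' = PySem.List.pyGetD l 1 ' '
  · rw [if_pos hab, if_pos hab]
  · rw [if_neg hab, if_neg hab, h0, h1]
    have key := (loops_iff_shift l).trans
      ((shift_iff_pattern l).trans (beq_iff_pattern l).symm)
    by_cases he : pvLoopA l (PySem.List.pyRange 0 ((l.length : Int) - 2) 2) = true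
    · by_cases ho : pvLoopA l (PySem.List.pyRange 1 ((l.length : Int) - 2) 2) = true
      · rw [if_neg (by simp [he]), if_neg (by simp [ho])]
        exact (key.1 ⟨he, ho⟩).symm
      · have ho' : pvLoopA l (PySem.List.pyRange 1 ((l.length : Int) - 2) 2) = false :=
          Bool.eq_false_iff.mpr (fun h => ho h)
        rw [if_neg (by simp [he]), if_pos ho']
        cases hc : (l == ((List.replicate (l.length / 2 + 1)
            [l.getD 0 ' ', l.getD 1 ' ']).flatten).take l.length) with
        | false => rfl
        | true => exact absurd (key.2 hc).2 ho
    · have he' : pvLoopA l (PySem.List.pyRange 0 ((l.length : Int) - 2) 2) = false :=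
        Bool.eq_false_iff.mpr (fun h => he h)
      rw [if_pos he']
      cases hc : (l == ((List.replicate (l.length / 2 + 1)
          [l.getD 0 ' ', l.getD 1 ' ']).flatten).take l.length) with
      | false => rfl
      | true => exact absurd (key.2 hc).1 he
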